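-- pv_equiv track=rewrite | github.com/lifepopkay/alx-higher_level_programming | 0x07-python-test_driven_development/5-text_indentation.py | text_indentation
-- ===== SOURCE A (Python) =====
-- def text_indentation(text):
--     """
--         This function prints a text with 2 new lines
--         after each of these characters: ., ? and :
--
--         arg:text: string to be formated
--
--         Raise: TypeError : text must be string
--     """
--     if type(text) != str:
--         raise TypeError("text must be a string")
--
--     new_text = ""
--     pun = [".", "?", ":"]
--
--     for char in text:
--         new_text += char
--         if char in pun:
--             new_text += "\n"
--             new_text += "\n"
--     lines = new_text.split('\n')
--     final_text = '\n'.join(line.strip() for line in lines)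
--     return final_text
-- ===== SOURCE B (Python) =====
-- def text_indentation(text):
--     """Same formatting via a sentinel-replace + split/join pipeline (no char loop).
--
--     Uses '\x00' as a segment marker, which never occurs in the (printable
--     ASCII + tab/newline/CR) input domain.
--     """
--     if type(text) != str:
--         raise TypeError("text must be a string")
--
--     marked = text
--     for p in ".?:":
--         marked = marked.replace(p, p + "\x00")
--     out_lines = []
--     for line in marked.split("\n"):
--         out_lines.append("\n\n".join(seg.strip() for seg in line.split("\x00")))
--     return "\n".join(out_lines)
-- ===== Notes on version B (the rewrite author's own statement) =====
-- stated objective: faster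
-- what changed: Replaces A's character-by-character Python loop (append char, append two newlines, then global split/strip/rejoin) with a str.replace sentinel-marking pass plus a per-line split/strip/join pipeline; the sentinel '\x00' cannot occur in the stated printable-ASCII(+tab/CR/LF) input domain.
import Mathlib
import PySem

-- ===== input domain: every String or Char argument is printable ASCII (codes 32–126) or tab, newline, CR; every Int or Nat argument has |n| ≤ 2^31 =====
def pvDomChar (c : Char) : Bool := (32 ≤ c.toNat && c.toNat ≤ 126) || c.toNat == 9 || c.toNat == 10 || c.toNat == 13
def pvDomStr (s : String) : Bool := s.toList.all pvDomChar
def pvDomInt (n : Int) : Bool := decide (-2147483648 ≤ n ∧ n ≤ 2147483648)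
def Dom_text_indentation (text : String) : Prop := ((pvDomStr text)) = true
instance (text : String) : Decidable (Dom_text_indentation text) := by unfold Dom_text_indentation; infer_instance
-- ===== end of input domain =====

-- B replaces A's char-by-char accumulation with a sentinel-replace ('\x00', a char outside
-- the stated input domain) plus a per-line split/strip/join pipeline; same return value on Dom.


-- ===== PORT A =====
def text_indentation (text : String) : String :=
  let new_text : List Char := []
  let pun : List Char := ['.', '?', ':']
  let new_text := text.toList.foldl (fun new_text char =>
    let new_text := new_text ++ [char]
    if char ∈ pun then
      let new_text := new_text ++ ['\n']
      new_text ++ ['\n']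
    else new_text) new_text
  let lines := PySem.Chars.splitOn new_text ['\n']
  let final_text := PySem.Chars.join ['\n'] (lines.map PySem.Chars.strip)
  String.ofList final_text

-- ===== PORT B =====
def text_indentation_alt (text : String) : String :=
  let marked := ['.', '?', ':'].foldl
    (fun marked p => PySem.Chars.replace marked [p] [p, '\x00']) text.toList
  let out_lines := (PySem.Chars.splitOn marked ['\n']).map (fun line =>
    PySem.Chars.join ['\n', '\n'] ((PySem.Chars.splitOn line ['\x00']).map PySem.Chars.strip))
  String.ofList (PySem.Chars.join ['\n'] out_lines)

-- ===== PRECONDITION & SPEC =====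
def Spec_text_indentation (text : String) (out : String) : Prop := out = text_indentation_alt text
instance (text : String) (out : String) : Decidable (Spec_text_indentation text out) := by unfold Spec_text_indentation; infer_instance

-- ===== CLAIM (what is proved, stated in full; the proofs are below) =====
def Claim_equal_text_indentation : Prop := ∀ (text : String), Dom_text_indentation text → Spec_text_indentation text (text_indentation text)

-- ===== LEMMAS AND PROOFS =====

-- per-char images of the two marking passes
def pvFA (c : Char) : List Char := if c = '.' ∨ c = '?' ∨ c = ':' then [c, '\n', '\n'] else [c]
def pvFB (c : Char) : List Char := if c = '.' ∨ c = '?' ∨ c = ':' then [c, '\x00'] else [c]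

-- prepend x to the first piece
def pvAppHead (x : List Char) : List (List Char) → List (List Char)
  | [] => [x]
  | s :: ss => (x ++ s) :: ss

-- reference form of Python's str.split(sep) for a 1-character sep
def pvSplit (n : Char) : List Char → List (List Char)
  | [] => [[]]
  | c :: cs => if c = n then [] :: pvSplit n cs else pvAppHead [c] (pvSplit n cs)

-- insert an empty piece between consecutive pieces
def pvInterE : List (List Char) → List (List Char)
  | [] => []
  | m :: ms => m :: ms.flatMap (fun t => [([] : List Char), t])

def pvExpand (l : List Char) : List (List Char) := pvInterE (pvSplit '\x00' l)
def pvE (ls : List (List Char)) : List (List Char) := (ls.map pvExpand).flatten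

theorem pvSplit_ne_nil (n : Char) (l : List Char) : pvSplit n l ≠ [] := by
  cases l with
  | nil => simp [pvSplit]
  | cons c cs =>
    simp only [pvSplit]; split
    · simp
    · cases h : pvSplit n cs <;> simp [pvAppHead]

theorem pvExpand_ne_nil (l : List Char) : pvExpand l ≠ [] := by
  unfold pvExpand
  cases h : pvSplit '\x00' l with
  | nil => exact absurd h (pvSplit_ne_nil _ _)
  | cons m ms => simp [pvInterE]

-- splitOn with a 1-character separator computes pvSplit
theorem pvSplitOn_go (n : Char) :
    ∀ (l : List Char) (fuel : Nat) (cur : List Char) (acc : List (List Char)),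
      l.length < fuel →
      PySem.Chars.splitOn.go [n] fuel l cur acc
        = acc.reverse ++ pvAppHead cur.reverse (pvSplit n l) := by
  intro l
  induction l with
  | nil =>
    intro fuel cur acc h
    cases fuel with
    | zero => omega
    | succ f => simp [PySem.Chars.splitOn.go, pvSplit, pvAppHead]
  | cons c rest ih =>
    intro fuel cur acc h
    cases fuel with
    | zero => omega
    | succ f =>
      simp only [PySem.Chars.splitOn.go]
      by_cases hc : n = c
      · subst hc
        simp only [List.isPrefixOf, BEq.rfl, Bool.true_and, if_true, List.length_cons,
          List.length_nil, Nat.zero_add, List.drop_succ_cons, List.drop_zero]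
        rw [ih _ _ _ (by simpa using Nat.lt_of_succ_lt_succ h)]
        simp only [pvSplit, if_true, List.reverse_cons, List.reverse_nil, pvAppHead]
        cases hs : pvSplit n rest with
        | nil => exact absurd hs (pvSplit_ne_nil n rest)
        | cons m ms => simp
      · have hpre : ([n].isPrefixOf (c :: rest)) = false := by
          simp [List.isPrefixOf, hc]
        rw [hpre]
        simp only [Bool.false_eq_true, if_false]
        rw [ih _ _ _ (by simpa using Nat.lt_of_succ_lt_succ h)]
        have hcn : ¬ (c = n) := fun he => hc he.symm
        simp only [pvSplit, hcn, if_false]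
        cases hs : pvSplit n rest <;> simp [pvAppHead]

theorem pvSplitOn_eq (n : Char) (s : List Char) :
    PySem.Chars.splitOn s [n] = pvSplit n s := by
  unfold PySem.Chars.splitOn
  rw [pvSplitOn_go n s (s.length + 1) [] [] (by omega)]
  cases hs : pvSplit n s with
  | nil => exact absurd hs (pvSplit_ne_nil n s)
  | cons m ms => simp [pvAppHead]

-- replace with a 1-character pattern is a flatMap
theorem pvReplace_go (p : Char) (new : List Char) :
    ∀ (l : List Char) (fuel : Nat) (acc : List Char),
      l.length ≤ fuel →
      PySem.Chars.replace.go [p] new fuel l acc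
        = acc.reverse ++ l.flatMap (fun c => if c = p then new else [c]) := by
  intro l
  induction l with
  | nil =>
    intro fuel acc h
    cases fuel <;> simp [PySem.Chars.replace.go]
  | cons c rest ih =>
    intro fuel acc h
    cases fuel with
    | zero => simp at h
    | succ f =>
      simp only [PySem.Chars.replace.go]
      by_cases hc : p = c
      · subst hc
        simp only [List.isPrefixOf, BEq.rfl, Bool.true_and, if_true, List.length_cons,
          List.length_nil, Nat.zero_add, List.drop_succ_cons, List.drop_zero]
        rw [ih _ _ (by simpa using Nat.le_of_succ_le_succ h)]
        simp
      · have hpre : ([p].isPrefixOf (c :: rest)) = false := by simp [List.isPrefixOf, hc]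
        rw [hpre]
        simp only [Bool.false_eq_true, if_false]
        rw [ih _ _ (by simpa using Nat.le_of_succ_le_succ h)]
        have hcn : ¬ (c = p) := fun he => hc he.symm
        simp [hcn]

theorem pvReplace_eq (p : Char) (new : List Char) (s : List Char) :
    PySem.Chars.replace s [p] new = s.flatMap (fun c => if c = p then new else [c]) := by
  unfold PySem.Chars.replace
  simp only [List.isEmpty_cons, Bool.false_eq_true, if_false]
  exact pvReplace_go p new s s.length [] (le_refl _)

-- A's loop builds flatMap pvFA
theorem pvFoldA (cs : List Char) (acc : List Char) :
    cs.foldl (fun new_text char =>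
      let new_text := new_text ++ [char]
      if char ∈ ['.', '?', ':'] then
        let new_text := new_text ++ ['\n']
        new_text ++ ['\n']
      else new_text) acc = acc ++ cs.flatMap pvFA := by
  induction cs generalizing acc with
  | nil => simp
  | cons c rest ih =>
    simp only [List.foldl_cons, List.flatMap_cons, ih]
    by_cases hc : c = '.' ∨ c = '?' ∨ c = ':'
    · have : c ∈ ['.', '?', ':'] := by simp [hc]
      simp [this, pvFA, hc]
    · have : c ∉ ['.', '?', ':'] := by simp_all
      simp [this, pvFA, hc]

-- B's replace chain builds flatMap pvFB
theorem pvFoldB (cs : List Char) :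
    ['.', '?', ':'].foldl (fun marked p => PySem.Chars.replace marked [p] [p, '\x00']) cs
      = cs.flatMap pvFB := by
  simp only [List.foldl_cons, List.foldl_nil, pvReplace_eq, List.flatMap_assoc]
  apply List.flatMap_congr
  intro c _
  by_cases h1 : c = '.'
  · subst h1; decide
  by_cases h2 : c = '?'
  · subst h2; decide
  by_cases h3 : c = ':'
  · subst h3; decide
  simp [h1, h2, h3, pvFB]

-- pvExpand commutes with prepending a non-sentinel char to the first piece
theorem pvExpand_appHead (c : Char) (hc : c ≠ '\x00') (l : List Char) :
    pvExpand (c :: l) = pvAppHead [c] (pvExpand l) := by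
  unfold pvExpand
  simp only [pvSplit, hc, if_false]
  cases h : pvSplit '\x00' l with
  | nil => exact absurd h (pvSplit_ne_nil _ _)
  | cons m ms => simp [pvAppHead, pvInterE]

theorem pvE_appHead (c : Char) (hc : c ≠ '\x00') (ls : List (List Char)) (h : ls ≠ []) :
    pvE (pvAppHead [c] ls) = pvAppHead [c] (pvE ls) := by
  cases ls with
  | nil => exact absurd rfl h
  | cons l rest =>
    simp only [pvAppHead, List.singleton_append, pvE, List.map_cons, List.flatten_cons,
      pvExpand_appHead c hc]
    cases he : pvExpand l with
    | nil => exact absurd he (pvExpand_ne_nil l)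
    | cons e es => simp [pvAppHead]

theorem pvE_pun (c : Char) (hc : c ≠ '\x00') (ls : List (List Char)) (h : ls ≠ []) :
    pvE (pvAppHead [c] (pvAppHead ['\x00'] ls)) = [c] :: [] :: pvE ls := by
  cases ls with
  | nil => exact absurd rfl h
  | cons l rest =>
    simp only [pvAppHead, List.singleton_append, pvE, List.map_cons, List.flatten_cons]
    have h2 : pvExpand (c :: '\x00' :: l) = [c] :: [] :: pvExpand l := by
      unfold pvExpand
      simp only [pvSplit, hc, if_false, if_pos rfl]
      cases hsp : pvSplit '\x00' l with
      | nil => exact absurd hsp (pvSplit_ne_nil _ _)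
      | cons m ms => simp [pvAppHead, pvInterE]
    rw [h2]
    simp

-- segment correspondence between the two marked strings
theorem pvSeg (cs : List Char) (h : ∀ c ∈ cs, c ≠ '\x00') :
    pvSplit '\n' (cs.flatMap pvFA) = pvE (pvSplit '\n' (cs.flatMap pvFB)) := by
  induction cs with
  | nil => simp [pvSplit, pvE, pvExpand, pvInterE]
  | cons c rest ih =>
    have hc : c ≠ '\x00' := h c (by simp)
    have ih' := ih (fun x hx => h x (by simp [hx]))
    simp only [List.flatMap_cons]
    by_cases hp : c = '.' ∨ c = '?' ∨ c = ':'
    · have hcn : c ≠ '\n' := by rcases hp with h|h|h <;> subst h <;> decide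
      simp only [pvFA, pvFB, hp, if_true, List.cons_append, List.nil_append]
      simp only [pvSplit, hcn, if_false, if_pos rfl,
        show ('\x00' : Char) ≠ '\n' from by decide, ih']
      rw [pvE_pun c hc _ (pvSplit_ne_nil _ _)]
      cases hs : pvSplit '\n' (rest.flatMap pvFB) with
      | nil => exact absurd hs (pvSplit_ne_nil _ _)
      | cons m ms => simp [pvAppHead]
    · by_cases hn : c = '\n'
      · subst hn
        simp only [pvFA, pvFB, hp, if_false, List.cons_append, List.nil_append]
        simp only [pvSplit, if_pos rfl, ih', pvE]
        simp [pvExpand, pvSplit, pvInterE]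
      · simp only [pvFA, pvFB, hp, if_false, List.cons_append, List.nil_append]
        simp only [pvSplit, hn, if_false, ih']
        rw [pvE_appHead c hc _ (pvSplit_ne_nil _ _)]

theorem pvJoin_singleton (sep x : List Char) : PySem.Chars.join sep [x] = x := by
  simp [PySem.Chars.join, List.intercalate]

theorem pvJoin_cons (sep x : List Char) (xs : List (List Char)) (h : xs ≠ []) :
    PySem.Chars.join sep (x :: xs) = x ++ sep ++ PySem.Chars.join sep xs := by
  cases xs with
  | nil => exact absurd rfl h
  | cons y ys => simp [PySem.Chars.join, List.intercalate, List.intersperse]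

theorem pvJoin_append (sep : List Char) (as bs : List (List Char)) (ha : as ≠ []) (hb : bs ≠ []) :
    PySem.Chars.join sep (as ++ bs) = PySem.Chars.join sep as ++ sep ++ PySem.Chars.join sep bs := by
  induction as with
  | nil => exact absurd rfl ha
  | cons a as ih =>
    cases as with
    | nil => rw [List.singleton_append, pvJoin_cons sep a bs hb, pvJoin_singleton]
    | cons a' as' =>
      rw [List.cons_append, pvJoin_cons sep a _ (by simp), pvJoin_cons sep a (a' :: as') (by simp),
        ih (by simp)]
      simp [List.append_assoc]

theorem pvStrip_nil : PySem.Chars.strip ([] : List Char) = [] := by decide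

-- joining expanded pieces with '\n' equals joining the pieces with "\n\n"
theorem pvJoinInter (ms : List (List Char)) (h : ms ≠ []) :
    PySem.Chars.join ['\n'] ((pvInterE ms).map PySem.Chars.strip)
      = PySem.Chars.join ['\n', '\n'] (ms.map PySem.Chars.strip) := by
  induction ms with
  | nil => exact absurd rfl h
  | cons m ms ih =>
    cases ms with
    | nil => simp [pvInterE, pvJoin_singleton]
    | cons m2 rest =>
      have ih' := ih (by simp)
      have hflat : pvInterE (m :: m2 :: rest) = m :: [] :: pvInterE (m2 :: rest) := by
        simp [pvInterE]
      rw [hflat]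
      simp only [List.map_cons, pvStrip_nil]
      rw [pvJoin_cons _ _ _ (by simp), pvJoin_cons _ _ _ (by
        cases hrest : pvInterE (m2 :: rest) <;> simp_all [pvInterE])]
      rw [ih', pvJoin_cons _ _ _ (by simp)]
      simp

theorem pvE_ne_nil (ls : List (List Char)) (h : ls ≠ []) : pvE ls ≠ [] := by
  cases ls with
  | nil => exact absurd rfl h
  | cons l rest =>
    simp only [pvE, List.map_cons, List.flatten_cons]
    cases he : pvExpand l with
    | nil => exact absurd he (pvExpand_ne_nil l)
    | cons e es => simp

theorem pvJoinE (ls : List (List Char)) (h : ls ≠ []) :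
    PySem.Chars.join ['\n'] ((pvE ls).map PySem.Chars.strip)
      = PySem.Chars.join ['\n'] (ls.map (fun l =>
          PySem.Chars.join ['\n', '\n'] ((pvSplit '\x00' l).map PySem.Chars.strip))) := by
  induction ls with
  | nil => exact absurd rfl h
  | cons l rest ih =>
    cases rest with
    | nil =>
      simp only [pvE, List.map_cons, List.map_nil, List.flatten_cons, List.flatten_nil,
        List.append_nil]
      rw [pvJoin_singleton]
      simp only [pvExpand]
      rw [pvJoinInter _ (pvSplit_ne_nil _ _)]
    | cons l2 rest2 =>
      have hE : pvE (l :: l2 :: rest2) = pvExpand l ++ pvE (l2 :: rest2) := by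
        simp [pvE]
      rw [hE, List.map_append,
        pvJoin_append _ _ _ (by simpa using pvExpand_ne_nil l)
          (by simpa using pvE_ne_nil (l2 :: rest2) (by simp)),
        ih (by simp)]
      simp only [pvExpand]
      rw [pvJoinInter _ (pvSplit_ne_nil _ _)]
      conv_rhs => rw [List.map_cons, pvJoin_cons _ _ _ (by simp)]

-- ===== VERDICT (by name: the statement is the Claim_ definition above) =====
theorem text_indentation_spec : Claim_equal_text_indentation := by
  intro text hdom
  have hchars : ∀ c ∈ text.toList, c ≠ '\x00' := by
    intro c hc hcz
    have := List.all_eq_true.mp hdom c hc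
    subst hcz
    simp [pvDomChar] at this
  unfold Spec_text_indentation text_indentation text_indentation_alt
  simp only [pvFoldA, pvFoldB, List.nil_append, pvSplitOn_eq]
  rw [pvSeg text.toList hchars, pvJoinE _ (pvSplit_ne_nil _ _)]
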